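-- pv_equiv track=rewrite | github.com/sphinx-contrib/matlabdomain | sphinxcontrib/mat_types.py | shortest_name
-- ===== SOURCE A (Python) =====
-- def shortest_name(dotted_path):
--     # Creates the shortest valid MATLAB name from a dotted path
--     parts = dotted_path.split(".")
--     if len(parts) == 1:
--         return parts[0].lstrip("+")
--
--     if "@" in dotted_path:
--         return dotted_path
--
--     parts_to_keep = []
--     for part in parts[:-1]:
--         if part.startswith("+"):
--             parts_to_keep.append(part.lstrip("+"))
--         elif len(parts_to_keep) > 0:
--             parts_to_keep = []
--     parts_to_keep.append(parts[-1].lstrip("+"))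
--     return ".".join(parts_to_keep)
-- ===== SOURCE B (Python) =====
-- def shortest_name(dotted_path):
--     # Reverse scan with break instead of accumulate-and-reset bookkeeping.
--     parts = dotted_path.split(".")
--     if len(parts) == 1:
--         return parts[0].lstrip("+")
--
--     if "@" in dotted_path:
--         return dotted_path
--
--     kept = []
--     for part in reversed(parts[:-1]):
--         if not part.startswith("+"):
--             break
--         kept.append(part.lstrip("+"))
--     kept.reverse()
--     kept.append(parts[-1].lstrip("+"))
--     return ".".join(kept)
-- ===== Notes on version B (the rewrite author's own statement) =====
-- stated objective: simpler
-- what changed: The forward accumulate-and-reset loop over parts[:-1] is replaced by a reverse scan that collects '+'-prefixed parts and breaks at the first part without '+', then reverses the collected run back; the reset bookkeeping disappears.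
import Mathlib
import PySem

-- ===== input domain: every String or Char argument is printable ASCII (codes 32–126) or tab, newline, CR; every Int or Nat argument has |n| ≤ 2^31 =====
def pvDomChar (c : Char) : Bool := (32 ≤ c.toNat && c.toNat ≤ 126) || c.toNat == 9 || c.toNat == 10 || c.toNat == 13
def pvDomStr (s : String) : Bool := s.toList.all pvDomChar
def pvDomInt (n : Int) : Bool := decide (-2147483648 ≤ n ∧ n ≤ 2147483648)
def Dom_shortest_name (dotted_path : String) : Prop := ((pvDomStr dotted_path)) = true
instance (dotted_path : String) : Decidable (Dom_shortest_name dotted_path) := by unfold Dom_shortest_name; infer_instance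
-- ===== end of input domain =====

-- B replaces A's forward accumulate-and-reset loop with a reverse scan that breaks at the
-- first part not starting with '+' (objective: simpler).

-- ===== PORT A =====
-- exact port of Python's s.lstrip("+"): drop leading '+' characters
def pvLstripPlus (s : String) : String := String.ofList (s.toList.dropWhile (· == '+'))

def shortest_name (dotted_path : String) : String :=
  let parts := (PySem.Str.split? dotted_path ".").getD []
  if parts.length == 1 then pvLstripPlus (parts.headD "")
  else if PySem.Str.isIn "@" dotted_path then dotted_path
  else
    let parts_to_keep := parts.dropLast.foldl
      (fun acc part =>
        if PySem.Str.startswith part "+" then acc ++ [pvLstripPlus part]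
        else if acc.length > 0 then [] else acc) []
    PySem.Str.join "." (parts_to_keep ++ [pvLstripPlus (parts.getLastD "")])

-- ===== PORT B =====
-- the reverse-scan loop with break: collect lstripped '+'-parts, stop at the first other part
def pvCollectPlus : List String → List String
  | [] => []
  | p :: rest =>
    if PySem.Str.startswith p "+" then pvLstripPlus p :: pvCollectPlus rest else []

def shortest_name_alt (dotted_path : String) : String :=
  let parts := (PySem.Str.split? dotted_path ".").getD []
  if parts.length == 1 then pvLstripPlus (parts.headD "")
  else if PySem.Str.isIn "@" dotted_path then dotted_path
  else
    let kept := (pvCollectPlus parts.dropLast.reverse).reverse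
    PySem.Str.join "." (kept ++ [pvLstripPlus (parts.getLastD "")])

-- ===== PRECONDITION & SPEC =====
def Spec_shortest_name (dotted_path : String) (out : String) : Prop := out = shortest_name_alt dotted_path
instance (dotted_path : String) (out : String) : Decidable (Spec_shortest_name dotted_path out) := by unfold Spec_shortest_name; infer_instance

-- ===== CLAIM (what is proved, stated in full; the proofs are below) =====
def Claim_equal_shortest_name : Prop := ∀ (dotted_path : String), Dom_shortest_name dotted_path → Spec_shortest_name dotted_path (shortest_name dotted_path)

-- ===== LEMMAS AND PROOFS =====

theorem pv_reset (acc : List String) :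
    (if acc.length > 0 then ([] : List String) else acc) = [] := by
  cases acc <;> simp

theorem pv_collect_nil : pvCollectPlus [] = [] := by
  simp only [pvCollectPlus]

theorem pv_collect_singleton (p : String) :
    pvCollectPlus [p]
      = if PySem.Str.startswith p "+" then [pvLstripPlus p] else [] := by
  simp only [pvCollectPlus]

theorem pv_collect_append (xs ys : List String) :
    pvCollectPlus (xs ++ ys) =
      if xs.all (fun p => PySem.Str.startswith p "+") then xs.map pvLstripPlus ++ pvCollectPlus ys
      else pvCollectPlus xs := by
  induction xs with
  | nil => simp
  | cons p rest ih =>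
    simp only [List.cons_append, pvCollectPlus, List.all_cons, List.map_cons]
    by_cases h : PySem.Str.startswith p "+" = true
    · rw [if_pos h, if_pos h, ih, h, Bool.true_and]
      split_ifs <;> simp
    · have h' : PySem.Str.startswith p "+" = false := eq_false_of_ne_true h
      rw [if_neg h, if_neg h, h', Bool.false_and]
      simp

theorem pv_collect_all (xs : List String)
    (h : xs.all (fun p => PySem.Str.startswith p "+") = true) :
    pvCollectPlus xs = xs.map pvLstripPlus := by
  have h2 := pv_collect_append xs []
  rw [if_pos h] at h2
  simpa [pv_collect_nil] using h2

theorem pv_all_reverse (xs : List String) :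
    xs.reverse.all (fun p => PySem.Str.startswith p "+")
      = xs.all (fun p => PySem.Str.startswith p "+") := by
  simp [List.all_eq]

theorem pv_foldl_eq (l acc : List String) :
    l.foldl (fun acc part =>
        if PySem.Str.startswith part "+" then acc ++ [pvLstripPlus part]
        else if acc.length > 0 then [] else acc) acc
    = if l.all (fun p => PySem.Str.startswith p "+") then
        acc ++ (pvCollectPlus l.reverse).reverse
      else (pvCollectPlus l.reverse).reverse := by
  induction l generalizing acc with
  | nil => simp [pv_collect_nil]
  | cons p rest ih =>
    rw [List.foldl_cons, List.reverse_cons, pv_collect_append, pv_all_reverse]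
    by_cases h : PySem.Str.startswith p "+" = true
    · have hstep : (if PySem.Str.startswith p "+" then acc ++ [pvLstripPlus p]
          else if acc.length > 0 then [] else acc) = acc ++ [pvLstripPlus p] := if_pos h
      rw [hstep, ih]
      by_cases hall : rest.all (fun p => PySem.Str.startswith p "+") = true
      · rw [if_pos hall, if_pos hall, pv_collect_all rest.reverse (by rw [pv_all_reverse]; exact hall)]
        have hc : (p :: rest).all (fun p => PySem.Str.startswith p "+") = true := by
          rw [List.all_cons, h, hall]; rfl
        rw [if_pos hc, pv_collect_singleton, if_pos h]
        simp
      · have h2 : rest.all (fun p => PySem.Str.startswith p "+") = false :=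
          eq_false_of_ne_true hall
        have h3 : (p :: rest).all (fun p => PySem.Str.startswith p "+") = false := by
          rw [List.all_cons, h2, Bool.and_false]
        rw [h2, h3]
        simp
    · have h' : PySem.Str.startswith p "+" = false := eq_false_of_ne_true h
      have hstep : (if PySem.Str.startswith p "+" then acc ++ [pvLstripPlus p]
          else if acc.length > 0 then [] else acc) = [] := by
        rw [if_neg h, pv_reset]
      rw [hstep, ih]
      have h3 : (p :: rest).all (fun p => PySem.Str.startswith p "+") = false := by
        rw [List.all_cons, h', Bool.false_and]
      rw [h3]
      simp only [Bool.false_eq_true, if_false]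
      by_cases hall : rest.all (fun p => PySem.Str.startswith p "+") = true
      · rw [if_pos hall, if_pos hall, pv_collect_all rest.reverse (by rw [pv_all_reverse]; exact hall),
          pv_collect_singleton, if_neg h]
        simp
      · have h2 : rest.all (fun p => PySem.Str.startswith p "+") = false :=
          eq_false_of_ne_true hall
        rw [h2]
        simp only [Bool.false_eq_true, if_false]

-- ===== VERDICT (by name: the statement is the Claim_ definition above) =====
theorem shortest_name_spec : Claim_equal_shortest_name := by
  intro dotted_path _
  unfold Spec_shortest_name shortest_name shortest_name_alt
  simp only [pv_foldl_eq]
  split_ifs <;> simp
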